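-- pv_equiv track=rewrite | github.com/JulienGnty/Mazegame_SenseHat | digit_grid.py | set_digit_grid
-- ===== SOURCE A (Python) =====
-- def set_digit_grid(number,color1,color2=(0,0,0)):
--     """
--         Return a list of 64 elements for SenseHat led display
--         number must be positive and less than 100
--         color1 is the color used to display the digits
--         color2 is the background color
--     """
--
--     digits = [
--     [[color1,color1,color1],[color1,color2,color1],[color1,color2,color1],[color1,color2,color1],[color1,color1,color1]],
--     [[color2,color2,color1],[color2,color2,color1],[color2,color2,color1],[color2,color2,color1],[color2,color2,color1]],
--     [[color1,color1,color1],[color2,color2,color1],[color1,color1,color1],[color1,color2,color2],[color1,color1,color1]],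
--     [[color1,color1,color1],[color2,color2,color1],[color1,color1,color1],[color2,color2,color1],[color1,color1,color1]],
--     [[color1,color2,color1],[color1,color2,color1],[color1,color1,color1],[color2,color2,color1],[color2,color2,color1]],
--     [[color1,color1,color1],[color1,color2,color2],[color1,color1,color1],[color2,color2,color1],[color1,color1,color1]],
--     [[color1,color1,color1],[color1,color2,color2],[color1,color1,color1],[color1,color2,color1],[color1,color1,color1]],
--     [[color1,color1,color1],[color2,color2,color1],[color2,color2,color1],[color2,color2,color1],[color2,color2,color1]],
--     [[color1,color1,color1],[color1,color2,color1],[color1,color1,color1],[color1,color2,color1],[color1,color1,color1]],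
--     [[color1,color1,color1],[color1,color2,color1],[color1,color1,color1],[color2,color2,color1],[color1,color1,color1]]
--     ]
--
--     grid = [color2]*64
--
--     if 0 <= number < 100:
--         number = str(number).zfill(2)
--         for i in range(5):
--             grid[8+i*8:11+i*8] = digits[int(number[0])][i][:]
--             grid[12+i*8:15+i*8] = digits[int(number[1])][i][:]
--
--     return grid
-- ===== SOURCE B (Python) =====
-- # 5x3 bit glyphs for digits 0-9, row-major, '1' = digit color, '0' = background.
-- _GLYPHS = (
--     "111101101101111",  # 0
--     "001001001001001",  # 1
--     "111001111100111",  # 2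
--     "111001111001111",  # 3
--     "101101111001001",  # 4
--     "111100111001111",  # 5
--     "111100111101111",  # 6
--     "111001001001001",  # 7
--     "111101111101111",  # 8
--     "111101111001111",  # 9
-- )
--
-- def set_digit_grid(number, color1, color2=(0,0,0)):
--     if not (0 <= number < 100):
--         return [color2] * 64
--     s = str(number).zfill(2)
--     g0 = _GLYPHS[int(s[0])]
--     g1 = _GLYPHS[int(s[1])]
--     def cell(idx):
--         r, c = divmod(idx, 8)
--         if 1 <= r <= 5:
--             if c < 3 and g0[(r - 1) * 3 + c] == "1":
--                 return color1
--             if 4 <= c < 7 and g1[(r - 1) * 3 + (c - 4)] == "1":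
--                 return color1
--         return color2
--     return [cell(i) for i in range(64)]
-- ===== Notes on version B (the rewrite author's own statement) =====
-- stated objective: simpler
-- what changed: Replaces A's fully color-expanded 10x5x3 nested glyph table and per-row slice assignments into a mutated grid with a compact 5x3 bit-string glyph table and a single per-cell index-to-color comprehension over the 64 cells.
import Mathlib
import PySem

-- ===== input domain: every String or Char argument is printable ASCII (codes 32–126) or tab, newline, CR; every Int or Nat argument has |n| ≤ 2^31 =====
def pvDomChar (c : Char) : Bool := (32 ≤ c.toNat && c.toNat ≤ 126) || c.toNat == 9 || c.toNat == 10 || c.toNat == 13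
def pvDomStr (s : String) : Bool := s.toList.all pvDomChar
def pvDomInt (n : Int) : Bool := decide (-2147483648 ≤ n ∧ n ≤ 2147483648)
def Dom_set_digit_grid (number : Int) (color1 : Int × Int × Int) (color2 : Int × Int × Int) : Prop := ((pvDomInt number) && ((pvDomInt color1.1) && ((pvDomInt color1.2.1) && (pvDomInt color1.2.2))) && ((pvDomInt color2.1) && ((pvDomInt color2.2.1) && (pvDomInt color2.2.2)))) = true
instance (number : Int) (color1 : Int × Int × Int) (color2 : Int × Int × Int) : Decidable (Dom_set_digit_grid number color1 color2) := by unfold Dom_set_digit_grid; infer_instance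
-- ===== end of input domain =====

-- B replaces A's fully color-expanded 10x5x3 nested glyph table and per-row slice assignments
-- by a compact bit-string glyph table and a single per-cell comprehension (objective: simpler).

-- ===== PORT A =====

-- A's `digits` table (the 10 glyphs, each 5 rows of 3 colors), exactly as in the Python literal
def pvDigitsA (c1 c2 : Int × Int × Int) : List (List (List (Int × Int × Int))) :=
  [ [[c1,c1,c1],[c1,c2,c1],[c1,c2,c1],[c1,c2,c1],[c1,c1,c1]],
    [[c2,c2,c1],[c2,c2,c1],[c2,c2,c1],[c2,c2,c1],[c2,c2,c1]],
    [[c1,c1,c1],[c2,c2,c1],[c1,c1,c1],[c1,c2,c2],[c1,c1,c1]],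
    [[c1,c1,c1],[c2,c2,c1],[c1,c1,c1],[c2,c2,c1],[c1,c1,c1]],
    [[c1,c2,c1],[c1,c2,c1],[c1,c1,c1],[c2,c2,c1],[c2,c2,c1]],
    [[c1,c1,c1],[c1,c2,c2],[c1,c1,c1],[c2,c2,c1],[c1,c1,c1]],
    [[c1,c1,c1],[c1,c2,c2],[c1,c1,c1],[c1,c2,c1],[c1,c1,c1]],
    [[c1,c1,c1],[c2,c2,c1],[c2,c2,c1],[c2,c2,c1],[c2,c2,c1]],
    [[c1,c1,c1],[c1,c2,c1],[c1,c1,c1],[c1,c2,c1],[c1,c1,c1]],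
    [[c1,c1,c1],[c1,c2,c1],[c1,c1,c1],[c2,c2,c1],[c1,c1,c1]] ]

-- grid[a:b] = xs  (slice assignment; A only uses 0 ≤ a ≤ b ≤ len g with len xs = b - a, where take/drop is exact)
def pvSetSlice (g : List (Int × Int × Int)) (a b : Int) (xs : List (Int × Int × Int)) :
    List (Int × Int × Int) :=
  g.take a.toNat ++ xs ++ g.drop b.toNat

def set_digit_grid (number : Int) (color1 : Int × Int × Int) (color2 : Int × Int × Int) :
    List (Int × Int × Int) :=
  let digits := pvDigitsA color1 color2
  let grid : List (Int × Int × Int) := List.replicate 64 color2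
  if 0 ≤ number ∧ number < 100 then
    let s := PySem.Str.zfill (PySem.Int.toStr number) 2
    -- int(s[0]) / int(s[1]); under the guard these always succeed, so the getD defaults are unreachable
    let d0 := ((PySem.Str.pyGet? s 0).bind (fun c => PySem.Int.ofChars? [c])).getD 0
    let d1 := ((PySem.Str.pyGet? s 1).bind (fun c => PySem.Int.ofChars? [c])).getD 0
    (PySem.List.pyRange 0 5 1).foldl
      (fun g i =>
        let g := pvSetSlice g (8 + i * 8) (11 + i * 8)
          (PySem.List.pyGetD (PySem.List.pyGetD digits d0 []) i [])
        pvSetSlice g (12 + i * 8) (15 + i * 8)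
          (PySem.List.pyGetD (PySem.List.pyGetD digits d1 []) i []))
      grid
  else grid

-- ===== PORT B =====

def pvGlyphs : List String :=
  [ "111101101101111", "001001001001001", "111001111100111", "111001111001111",
    "101101111001001", "111100111001111", "111100111101111", "111001001001001",
    "111101111101111", "111101111001111" ]

def set_digit_grid_alt (number : Int) (color1 : Int × Int × Int) (color2 : Int × Int × Int) :
    List (Int × Int × Int) :=
  if ¬ (0 ≤ number ∧ number < 100) then List.replicate 64 color2
  else
    let s := PySem.Str.zfill (PySem.Int.toStr number) 2
    let g0 := PySem.List.pyGetD pvGlyphs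
      (((PySem.Str.pyGet? s 0).bind (fun c => PySem.Int.ofChars? [c])).getD 0) ""
    let g1 := PySem.List.pyGetD pvGlyphs
      (((PySem.Str.pyGet? s 1).bind (fun c => PySem.Int.ofChars? [c])).getD 0) ""
    let cell : Int → (Int × Int × Int) := fun idx =>
      let r := PySem.Int.floordiv idx 8
      let c := PySem.Int.mod idx 8
      if 1 ≤ r ∧ r ≤ 5 then
        if c < 3 ∧ PySem.Str.pyGet? g0 ((r - 1) * 3 + c) == some '1' then color1
        else if (4 ≤ c ∧ c < 7) ∧ PySem.Str.pyGet? g1 ((r - 1) * 3 + (c - 4)) == some '1' then color1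
        else color2
      else color2
    (PySem.List.pyRange 0 64 1).map cell

-- ===== PRECONDITION & SPEC =====
def Spec_set_digit_grid (number : Int) (color1 : Int × Int × Int) (color2 : Int × Int × Int) (out : List (Int × Int × Int)) : Prop := out = set_digit_grid_alt number color1 color2
instance (number : Int) (color1 : Int × Int × Int) (color2 : Int × Int × Int) (out : List (Int × Int × Int)) : Decidable (Spec_set_digit_grid number color1 color2 out) := by unfold Spec_set_digit_grid; infer_instance

-- ===== CLAIM (what is proved, stated in full; the proofs are below) =====
def Claim_equal_set_digit_grid : Prop := ∀ (number : Int) (color1 : Int × Int × Int) (color2 : Int × Int × Int), Dom_set_digit_grid number color1 color2 → Spec_set_digit_grid number color1 color2 (set_digit_grid number color1 color2)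

-- ===== LEMMAS AND PROOFS =====

-- Boolean skeletons of both grids (true = digit color, false = background): both ports are
-- shown to be the image of their skeleton under `pvPaint c1 c2`, and the skeletons are
-- compared by `decide` for all 100 in-range numbers.

def pvPaint (c1 c2 : Int × Int × Int) (b : Bool) : Int × Int × Int := if b then c1 else c2

def pvDigitsB : List (List (List Bool)) :=
  [ [[true,true,true],[true,false,true],[true,false,true],[true,false,true],[true,true,true]],
    [[false,false,true],[false,false,true],[false,false,true],[false,false,true],[false,false,true]],
    [[true,true,true],[false,false,true],[true,true,true],[true,false,false],[true,true,true]],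
    [[true,true,true],[false,false,true],[true,true,true],[false,false,true],[true,true,true]],
    [[true,false,true],[true,false,true],[true,true,true],[false,false,true],[false,false,true]],
    [[true,true,true],[true,false,false],[true,true,true],[false,false,true],[true,true,true]],
    [[true,true,true],[true,false,false],[true,true,true],[true,false,true],[true,true,true]],
    [[true,true,true],[false,false,true],[false,false,true],[false,false,true],[false,false,true]],
    [[true,true,true],[true,false,true],[true,true,true],[true,false,true],[true,true,true]],
    [[true,true,true],[true,false,true],[true,true,true],[false,false,true],[true,true,true]] ]

def pvSetSliceB (g : List Bool) (a b : Int) (xs : List Bool) : List Bool :=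
  g.take a.toNat ++ xs ++ g.drop b.toNat

def pvAgridB (number : Int) : List Bool :=
  if 0 ≤ number ∧ number < 100 then
    let s := PySem.Str.zfill (PySem.Int.toStr number) 2
    let d0 := ((PySem.Str.pyGet? s 0).bind (fun c => PySem.Int.ofChars? [c])).getD 0
    let d1 := ((PySem.Str.pyGet? s 1).bind (fun c => PySem.Int.ofChars? [c])).getD 0
    (PySem.List.pyRange 0 5 1).foldl
      (fun g i =>
        let g := pvSetSliceB g (8 + i * 8) (11 + i * 8)
          (PySem.List.pyGetD (PySem.List.pyGetD pvDigitsB d0 []) i [])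
        pvSetSliceB g (12 + i * 8) (15 + i * 8)
          (PySem.List.pyGetD (PySem.List.pyGetD pvDigitsB d1 []) i []))
      (List.replicate 64 false)
  else List.replicate 64 false

def pvBgridB (number : Int) : List Bool :=
  if ¬ (0 ≤ number ∧ number < 100) then List.replicate 64 false
  else
    let s := PySem.Str.zfill (PySem.Int.toStr number) 2
    let g0 := PySem.List.pyGetD pvGlyphs
      (((PySem.Str.pyGet? s 0).bind (fun c => PySem.Int.ofChars? [c])).getD 0) ""
    let g1 := PySem.List.pyGetD pvGlyphs
      (((PySem.Str.pyGet? s 1).bind (fun c => PySem.Int.ofChars? [c])).getD 0) ""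
    let cell : Int → Bool := fun idx =>
      let r := PySem.Int.floordiv idx 8
      let c := PySem.Int.mod idx 8
      if 1 ≤ r ∧ r ≤ 5 then
        if c < 3 ∧ PySem.Str.pyGet? g0 ((r - 1) * 3 + c) == some '1' then true
        else if (4 ≤ c ∧ c < 7) ∧ PySem.Str.pyGet? g1 ((r - 1) * 3 + (c - 4)) == some '1' then true
        else false
      else false
    (PySem.List.pyRange 0 64 1).map cell

theorem pvSetSlice_map (c1 c2 : Int × Int × Int) (g : List Bool) (a b : Int) (xs : List Bool) :
    (pvSetSliceB g a b xs).map (pvPaint c1 c2) =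
      pvSetSlice (g.map (pvPaint c1 c2)) a b (xs.map (pvPaint c1 c2)) := by
  simp [pvSetSlice, pvSetSliceB]

theorem pvDigits_map (c1 c2 : Int × Int × Int) :
    pvDigitsA c1 c2 = pvDigitsB.map (List.map (List.map (pvPaint c1 c2))) := rfl

theorem pvRow_map (c1 c2 : Int × Int × Int) (d i : Int) :
    (PySem.List.pyGetD (PySem.List.pyGetD pvDigitsB d []) i []).map (pvPaint c1 c2) =
      PySem.List.pyGetD (PySem.List.pyGetD (pvDigitsA c1 c2) d []) i [] := by
  rw [pvDigits_map c1 c2]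
  rw [show ([] : List (List (Int × Int × Int))) =
        List.map (List.map (pvPaint c1 c2)) [] from rfl,
      PySem.List.pyGetD_map]
  rw [show ([] : List (Int × Int × Int)) = List.map (pvPaint c1 c2) [] from rfl,
      PySem.List.pyGetD_map]

theorem pvA_map (number : Int) (c1 c2 : Int × Int × Int) :
    set_digit_grid number c1 c2 = (pvAgridB number).map (pvPaint c1 c2) := by
  unfold set_digit_grid pvAgridB
  by_cases h : 0 ≤ number ∧ number < 100
  · simp only [if_pos h]
    rw [show PySem.List.pyRange 0 5 1 = [0, 1, 2, 3, 4] from rfl]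
    simp only [List.foldl]
    simp only [pvSetSlice_map, pvRow_map, List.map_replicate]
    rfl
  · simp only [if_neg h, List.map_replicate]
    rfl

theorem pvB_map (number : Int) (c1 c2 : Int × Int × Int) :
    set_digit_grid_alt number c1 c2 = (pvBgridB number).map (pvPaint c1 c2) := by
  unfold set_digit_grid_alt pvBgridB
  by_cases h : 0 ≤ number ∧ number < 100
  · rw [if_neg (not_not_intro h), if_neg (not_not_intro h), List.map_map]
    refine congrArg (fun f => List.map f _) ?_
    funext idx
    simp only [Function.comp]
    split_ifs <;> rfl
  · rw [if_pos h, if_pos h, List.map_replicate]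
    rfl

set_option maxRecDepth 100000 in
set_option maxHeartbeats 4000000 in
theorem pvSkeleton_small : ∀ m ∈ List.range 100, pvAgridB (m : Int) = pvBgridB (m : Int) := by
  decide

theorem pvSkeleton_eq (number : Int) : pvAgridB number = pvBgridB number := by
  by_cases h : 0 ≤ number ∧ number < 100
  · have hm : number = ((number.toNat : Nat) : Int) := (Int.toNat_of_nonneg h.1).symm
    rw [hm]
    exact pvSkeleton_small number.toNat (List.mem_range.mpr (by omega))
  · rw [pvAgridB, if_neg h, pvBgridB, if_pos h]

-- ===== VERDICT (by name: the statement is the Claim_ definition above) =====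
theorem set_digit_grid_spec : Claim_equal_set_digit_grid := by
  intro number color1 color2 _
  unfold Spec_set_digit_grid
  rw [pvA_map, pvB_map, pvSkeleton_eq]
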